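-- pv_equiv track=rewrite | github.com/agarba360-beep/intelliprrsv2 | scripts/clean_sequences.py | predict_orfs
-- ===== SOURCE A (Python) =====
-- def predict_orfs(seq):
--     """Predict approximate ORF start positions using known motifs."""
--     sequence = str(seq).upper()
--     motifs = {
--         "ORF5": "ATGGGG",
--         "ORF6": "ATGTTG",
--         "ORF7": "ATGAGT"
--     }
--     results = {}
--     for orf, motif in motifs.items():
--         pos = sequence.find(motif)
--         results[orf] = pos if pos != -1 else None
--     return results
-- ===== SOURCE B (Python) =====
-- def predict_orfs(seq):
--     """Predict approximate ORF start positions using known motifs."""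
--     sequence = str(seq).upper()
--     p5 = p6 = p7 = None
--     for i in range(len(sequence) - 5):
--         sub = sequence[i:i + 6]
--         if p5 is None and sub == "ATGGGG":
--             p5 = i
--         if p6 is None and sub == "ATGTTG":
--             p6 = i
--         if p7 is None and sub == "ATGAGT":
--             p7 = i
--     return {"ORF5": p5, "ORF6": p6, "ORF7": p7}
-- ===== Notes on version B (the rewrite author's own statement) =====
-- stated objective: alternative
-- what changed: A calls .find separately for each of the three motifs (three passes over the sequence); B makes a single left-to-right sliding-window pass, recording the first index at which each motif's 6-char window appears.
import Mathlib
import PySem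

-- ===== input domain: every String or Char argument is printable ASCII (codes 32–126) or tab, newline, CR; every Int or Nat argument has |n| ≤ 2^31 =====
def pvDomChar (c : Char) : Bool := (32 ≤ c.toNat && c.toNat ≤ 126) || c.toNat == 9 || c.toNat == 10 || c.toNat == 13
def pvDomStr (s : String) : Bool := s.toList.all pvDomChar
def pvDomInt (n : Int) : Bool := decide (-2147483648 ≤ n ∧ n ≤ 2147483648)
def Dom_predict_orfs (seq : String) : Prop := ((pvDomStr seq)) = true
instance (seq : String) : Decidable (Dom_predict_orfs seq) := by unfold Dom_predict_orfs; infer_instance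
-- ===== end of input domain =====

-- B replaces A's three independent .find scans by one left-to-right sliding-window pass
-- recording the first hit of each motif (objective: alternative; not measured faster).

-- ===== PORT A =====
def predict_orfs (seq : String) : List (String × Option Int) :=
  let sequence := PySem.Str.upper seq
  let motifs : PySem.Dict String String :=
    ((PySem.Dict.empty.insert "ORF5" "ATGGGG").insert "ORF6" "ATGTTG").insert "ORF7" "ATGAGT"
  let results : PySem.Dict String (Option Int) :=
    motifs.items.foldl (fun r kv =>
      let pos := PySem.Str.find sequence kv.2
      r.insert kv.1 (if pos ≠ -1 then some pos else none)) PySem.Dict.empty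
  results.items

-- ===== PORT B =====
-- one pass, state = the (still-None or found) first positions of the three motifs
def predict_orfs_alt (seq : String) : List (String × Option Int) :=
  let s := (PySem.Str.upper seq).toList
  let st := (PySem.List.pyRange 0 ((s.length : Int) - 5)).foldl
    (fun (st : Option Int × Option Int × Option Int) i =>
      let sub := PySem.List.slice s (some i) (some (i + 6))
      let p5 := if st.1 = none ∧ sub = "ATGGGG".toList then some i else st.1
      let p6 := if st.2.1 = none ∧ sub = "ATGTTG".toList then some i else st.2.1
      let p7 := if st.2.2 = none ∧ sub = "ATGAGT".toList then some i else st.2.2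
      (p5, p6, p7)) (none, none, none)
  [("ORF5", st.1), ("ORF6", st.2.1), ("ORF7", st.2.2)]

-- ===== PRECONDITION & SPEC =====
def Spec_predict_orfs (seq : String) (out : List (String × Option Int)) : Prop := out = predict_orfs_alt seq
instance (seq : String) (out : List (String × Option Int)) : Decidable (Spec_predict_orfs seq out) := by unfold Spec_predict_orfs; infer_instance

-- ===== CLAIM (what is proved, stated in full; the proofs are below) =====
def Claim_equal_predict_orfs : Prop := ∀ (seq : String), Dom_predict_orfs seq → Spec_predict_orfs seq (predict_orfs seq)

-- ===== LEMMAS AND PROOFS =====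

-- whether B's window at k matches motif m
def pvHit (s m : List Char) (k : Nat) : Bool :=
  decide (PySem.List.slice s (some (k : Int)) (some ((k : Int) + 6)) = m)

-- single-motif step of B's loop
def pvStep (s m : List Char) (o : Option Int) (i : Int) : Option Int :=
  if o = none ∧ PySem.List.slice s (some i) (some (i + 6)) = m then some i else o

-- B's triple fold is three independent single-motif folds
theorem pvFold_triple (s : List Char) (l : List Int) (a b c : Option Int) :
    l.foldl (fun (st : Option Int × Option Int × Option Int) i =>
      let sub := PySem.List.slice s (some i) (some (i + 6))
      let p5 := if st.1 = none ∧ sub = "ATGGGG".toList then some i else st.1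
      let p6 := if st.2.1 = none ∧ sub = "ATGTTG".toList then some i else st.2.1
      let p7 := if st.2.2 = none ∧ sub = "ATGAGT".toList then some i else st.2.2
      (p5, p6, p7)) (a, b, c)
    = (l.foldl (pvStep s "ATGGGG".toList) a,
       l.foldl (pvStep s "ATGTTG".toList) b,
       l.foldl (pvStep s "ATGAGT".toList) c) := by
  induction l generalizing a b c with
  | nil => rfl
  | cons x xs ih => simp only [List.foldl_cons, pvStep]; exact ih _ _ _

-- the single-motif fold over range n computes the first matching window
theorem pvFold_find? (s m : List Char) (n : Nat) :
    ((List.range n).map (fun (k : Nat) => (k : Int))).foldl (pvStep s m) none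
    = ((List.range n).find? (pvHit s m)).map (fun (k : Nat) => (k : Int)) := by
  induction n with
  | zero => rfl
  | succ n ih =>
    rw [List.range_succ, List.map_append, List.foldl_append, List.find?_append, ih]
    cases h : (List.range n).find? (pvHit s m) with
    | some j => simp [pvStep]
    | none =>
      simp only [Option.map_none, List.map_cons, List.foldl_cons,
        List.find?, Option.none_or]
      by_cases hm : PySem.List.slice s (some (n : Int)) (some ((n : Int) + 6)) = m
      · simp [pvStep, pvHit, hm]
      · simp [pvStep, pvHit, hm]

theorem pvFind?_range_eq_some (p : Nat → Bool) (n K : Nat) (hK : K < n) (hp : p K = true)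
    (hmin : ∀ i < K, p i = false) : (List.range n).find? p = some K := by
  induction n with
  | zero => omega
  | succ n ih =>
    rw [List.range_succ, List.find?_append]
    by_cases h : K < n
    · rw [ih h]; rfl
    · have hKn : K = n := by omega
      have : (List.range n).find? p = none := by
        rw [List.find?_eq_none]
        intro x hx
        simp only [List.mem_range] at hx
        simp [hmin x (by omega)]
      rw [this, ← hKn]
      simp [List.find?, hp]

-- window match ↔ prefix of the drop (for a 6-char motif)
theorem pvWindow_iff (s m : List Char) (hm : m.length = 6) (k : Nat) :
    PySem.List.slice s (some (k : Int)) (some ((k : Int) + 6)) = m ↔ m <+: s.drop k := by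
  rw [show ((k : Int) + 6) = ((k : Int) + ((6 : Nat) : Int)) by norm_num,
    PySem.List.slice_natCast_add]
  constructor
  · intro h; rw [← h]; exact List.take_prefix _ _
  · intro h; rw [List.prefix_iff_eq_take, hm] at h; exact h.symm

-- pyRange 0 (len-5) is range (len-5 : Nat) cast (Nat subtraction clamps exactly like the empty range)
theorem pvRange_eq (len : Nat) :
    PySem.List.pyRange 0 ((len : Int) - 5) = (List.range (len - 5)).map (fun (k : Nat) => (k : Int)) := by
  by_cases h : 5 ≤ len
  · have : ((len : Int) - 5) = ((len - 5 : Nat) : Int) := by omega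
    rw [this, PySem.List.pyRange_zero_natCast]
  · have h1 : PySem.List.pyRange 0 ((len : Int) - 5) = [] := by
      rw [List.eq_nil_iff_forall_not_mem]
      intro x hx
      rw [PySem.List.mem_pyRange_one] at hx
      omega
    have h2 : len - 5 = 0 := by omega
    simp [h1, h2]

-- the single-motif fold equals A's find-based value
theorem pvFold_eq_find (s m : List Char) (hm : m.length = 6) :
    (PySem.List.pyRange 0 ((s.length : Int) - 5)).foldl (pvStep s m) none
    = (if PySem.Chars.find s m ≠ -1 then some (PySem.Chars.find s m) else none) := by
  rw [pvRange_eq, pvFold_find?]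
  by_cases hf : PySem.Chars.find s m = -1
  · have hni : ¬ m <:+: s := (PySem.Chars.find_eq_neg_one_iff s m).mp hf
    have : (List.range (s.length - 5)).find? (pvHit s m) = none := by
      rw [List.find?_eq_none]
      intro x _
      simp only [pvHit, decide_eq_true_eq]
      intro hx
      exact hni ((PySem.Chars.isIn_iff_infix m s).mp
        ((PySem.Chars.exists_prefix_drop_iff_isIn m s).mp ⟨x, (pvWindow_iff s m hm x).mp hx⟩))
    simp [this, hf]
  · have hpos : 0 ≤ PySem.Chars.find s m := by
      have := PySem.Chars.neg_one_le_find s m; omega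
    obtain ⟨hpre, hmin⟩ := PySem.Chars.find_spec hpos
    set K := (PySem.Chars.find s m).toNat with hKdef
    have hlen : K + 6 ≤ s.length := by
      have h1 := hpre.length_le
      rw [List.length_drop, hm] at h1
      omega
    have : (List.range (s.length - 5)).find? (pvHit s m) = some K := by
      apply pvFind?_range_eq_some _ _ _ (by omega)
      · simpa [pvHit, decide_eq_true_eq] using (pvWindow_iff s m hm K).mpr hpre
      · intro i hi
        simp only [pvHit, decide_eq_false_iff_not]
        intro hx
        exact hmin i hi ((pvWindow_iff s m hm i).mp hx)
    simp only [this, Option.map_some, hf, ne_eq, not_false_iff, if_pos]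
    congr 1
    omega

-- ===== VERDICT (by name: the statement is the Claim_ definition above) =====
theorem predict_orfs_spec : Claim_equal_predict_orfs := by
  intro seq _
  show predict_orfs seq = predict_orfs_alt seq
  unfold predict_orfs predict_orfs_alt
  simp only [PySem.Str.find_eq, PySem.Str.toList_upper, PySem.Dict.insert, PySem.Dict.empty]
  rw [pvFold_triple]
  rw [pvFold_eq_find _ _ (by decide), pvFold_eq_find _ _ (by decide),
    pvFold_eq_find _ _ (by decide)]
  rfl
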